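-- pv_equiv track=rewrite | github.com/Emillhf/Construction_of_a_Self-Interpreter | Compilers/3_tape_to_1_tape.py | groupByTape1
-- ===== SOURCE A (Python) =====
-- def inner_list(rules,tape):
--     tape_dict = {}
--     for rule in rules:
--         tape_elm = rule[tape]
--         if tape_elm in tape_dict.keys():
--             tape_dict[tape_elm].append(rule)
--         else:
--             tape_dict[tape_elm] = [rule]
--     return list(tape_dict.values())
--
-- def groupByTape1(state_rules):
--     final = []
--     for grouped_rules in state_rules:
--         temp = []
--         for rules in grouped_rules:
--             temp.append(inner_list(rules,1))
--         final.append(temp)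
--
--     return final
-- ===== SOURCE B (Python) =====
-- def inner_list(rules, tape):
--     keys = []
--     for rule in rules:
--         k = rule[tape]
--         if k not in keys:
--             keys.append(k)
--     return [[rule for rule in rules if rule[tape] == k] for k in keys]
--
-- def groupByTape1(state_rules):
--     return [[inner_list(rules, 1) for rules in grouped_rules]
--             for grouped_rules in state_rules]
-- ===== Notes on version B (the rewrite author's own statement) =====
-- stated objective: alternative
-- what changed: inner_list now first collects the distinct tape-1 keys in first-seen order in one scan and then builds each group by a stable filter over the rules, instead of A's dict whose buckets grow in place during a single pass; Pre_ excludes inputs with a rule shorter than 2 elements, where rule[1] raises IndexError in both programs.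
import Mathlib
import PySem

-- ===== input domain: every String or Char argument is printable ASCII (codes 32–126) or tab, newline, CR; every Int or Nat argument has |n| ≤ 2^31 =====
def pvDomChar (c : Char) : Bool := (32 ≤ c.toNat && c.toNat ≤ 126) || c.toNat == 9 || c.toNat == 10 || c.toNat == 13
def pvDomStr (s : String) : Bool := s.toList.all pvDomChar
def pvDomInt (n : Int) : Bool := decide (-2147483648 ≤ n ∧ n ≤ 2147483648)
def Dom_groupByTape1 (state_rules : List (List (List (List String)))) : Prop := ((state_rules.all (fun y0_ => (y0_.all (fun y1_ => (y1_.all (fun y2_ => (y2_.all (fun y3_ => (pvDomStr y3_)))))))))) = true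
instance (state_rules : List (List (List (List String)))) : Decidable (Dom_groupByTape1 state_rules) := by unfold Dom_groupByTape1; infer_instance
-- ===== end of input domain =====

-- B groups each rule list by scanning once for the distinct tape-1 keys in first-seen
-- order and then stably filtering the rules per key, instead of A's incremental dict of
-- growing buckets (alternative decomposition; not claimed faster).

-- rule[tape]: Pre_ excludes the IndexError case (some rule shorter than 2), so the
-- `.getD ""` default is never reached on admitted inputs.
def pvKeyOf (tape : Int) (rule : List String) : String :=
  (PySem.List.pyGet? rule tape).getD ""

-- ===== PORT A =====
-- inner_list: dict from tape element to the list of its rules, built rule by rule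
def pvInnerA (rules : List (List String)) (tape : Int) : List (List (List String)) :=
  (rules.foldl (fun (tape_dict : PySem.Dict String (List (List String))) rule =>
      let tape_elm := pvKeyOf tape rule
      if tape_dict.contains tape_elm then tape_dict.modify tape_elm [] (· ++ [rule])
      else tape_dict.insert tape_elm [rule])
    PySem.Dict.empty).values

def groupByTape1 (state_rules : List (List (List (List String)))) : List (List (List (List (List String)))) :=
  state_rules.foldl (fun final grouped_rules =>
      final ++ [grouped_rules.foldl (fun temp rules => temp ++ [pvInnerA rules 1]) []])
    []

-- ===== PORT B =====
-- inner_list: the distinct keys in first-seen order, then one stable filter per key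
def pvKeysB (rules : List (List String)) (tape : Int) : List String :=
  rules.foldl (fun keys rule =>
      let k := pvKeyOf tape rule
      if keys.contains k then keys else keys ++ [k]) []

def pvInnerB (rules : List (List String)) (tape : Int) : List (List (List String)) :=
  (pvKeysB rules tape).map (fun k => rules.filter (fun rule => pvKeyOf tape rule == k))

def groupByTape1_alt (state_rules : List (List (List (List String)))) : List (List (List (List (List String)))) :=
  state_rules.map (fun grouped_rules => grouped_rules.map (fun rules => pvInnerB rules 1))

-- ===== PRECONDITION & SPEC =====
-- Pre_ excludes exactly the inputs where some rule has fewer than 2 elements: there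
-- rule[1] raises IndexError in Python A (and in B).
def Pre_groupByTape1 (state_rules : List (List (List (List String)))) : Prop :=
  (state_rules.all (fun grouped_rules => grouped_rules.all (fun rules =>
    rules.all (fun rule => decide (2 ≤ rule.length))))) = true
instance (state_rules : List (List (List (List String)))) : Decidable (Pre_groupByTape1 state_rules) := by unfold Pre_groupByTape1; infer_instance

def pvWitness_groupByTape1 : List (List (List (List String))) :=
  [[[["q0", "a", "b", "q1"], ["q0", "b", "a", "q0"], ["q1", "a", "c", "q1"]],
    [["q1", "b", "b", "q1"]]], [[]]]

def Spec_groupByTape1 (state_rules : List (List (List (List String)))) (out : List (List (List (List (List String))))) : Prop := out = groupByTape1_alt state_rules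
instance (state_rules : List (List (List (List String)))) (out : List (List (List (List (List String))))) : Decidable (Spec_groupByTape1 state_rules out) := by unfold Spec_groupByTape1; infer_instance

-- ===== CLAIM (what is proved, stated in full; the proofs are below) =====
def Claim_equal_groupByTape1 : Prop := ∀ (state_rules : List (List (List (List String)))), Dom_groupByTape1 state_rules → Pre_groupByTape1 state_rules → Spec_groupByTape1 state_rules (groupByTape1 state_rules)

-- ===== LEMMAS AND PROOFS =====

-- A's dict grouping of one rule list equals B's keys-then-filters grouping (on every
-- input: both sides read rule[tape] through the same total key function).
theorem pvInner_eq (rules : List (List String)) (tape : Int) :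
    pvInnerA rules tape = pvInnerB rules tape := by
  unfold pvInnerA pvInnerB pvKeysB
  -- the branching loop body is one uniform `modify`
  have hfold : (rules.foldl (fun (d : PySem.Dict String (List (List String))) rule =>
        let tape_elm := pvKeyOf tape rule
        if d.contains tape_elm then d.modify tape_elm [] (· ++ [rule])
        else d.insert tape_elm [rule]) PySem.Dict.empty)
      = rules.foldl (fun d rule => d.modify (pvKeyOf tape rule) [] (· ++ [rule]))
          PySem.Dict.empty := by
    apply PySem.List.foldl_congr_mem
    intro d rule _
    by_cases h : d.contains (pvKeyOf tape rule)
    · simp [h]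
    · simp only [Bool.not_eq_true] at h
      simp [h, PySem.Dict.modify, PySem.Dict.insert,
            PySem.Dict.getD_of_not_contains d [] h]
  rw [hfold]
  set d := rules.foldl (fun (d : PySem.Dict String (List (List String))) rule =>
        d.modify (pvKeyOf tape rule) [] (· ++ [rule])) PySem.Dict.empty with hd
  have hkeys : d.keys = PySem.Set.ofList (rules.map (pvKeyOf tape)) := by
    rw [hd, PySem.Dict.keys_foldl_modify_key]; rfl
  have hnd : d.keys.Nodup := by
    rw [hd]
    exact PySem.Dict.nodup_keys_foldl_modify_key rules (pvKeyOf tape) _ _ _ List.nodup_nil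
  have hB : (rules.foldl (fun keys rule =>
        if keys.contains (pvKeyOf tape rule) then keys else keys ++ [pvKeyOf tape rule]) [])
      = PySem.Set.ofList (rules.map (pvKeyOf tape)) := by
    rw [PySem.Set.ofList_eq_foldl, List.foldl_map]; rfl
  have hget : ∀ k, d.getD k [] = rules.filter (fun rule => pvKeyOf tape rule == k) := by
    intro k
    have hmap : d = (rules.map (fun r => (pvKeyOf tape r, r))).foldl
        (fun d p => d.modify p.1 [] (· ++ [p.2])) PySem.Dict.empty := by
      rw [hd, List.foldl_map]
    rw [hmap, PySem.Dict.getD_foldl_modify_append]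
    simp [List.filter_map, Function.comp_def]
  rw [PySem.Dict.values_eq_map_keys d hnd [], hkeys, hB]
  exact List.map_congr_left (fun k _ => hget k)

-- ===== VERDICT (by name: the statement is the Claim_ definition above) =====
theorem groupByTape1_spec : Claim_equal_groupByTape1 := by
  intro state_rules _ _
  unfold Spec_groupByTape1 groupByTape1 groupByTape1_alt
  rw [PySem.List.foldl_append_singleton_eq_map]
  simp only [List.nil_append]
  refine List.map_congr_left (fun grouped_rules _ => ?_)
  rw [PySem.List.foldl_append_singleton_eq_map]
  simp only [List.nil_append]
  exact List.map_congr_left (fun rules _ => pvInner_eq rules 1)
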